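-- pv_equiv track=rewrite | github.com/HenryRobertRice/advent-of-code-2020 | day-18-1.py | all_in_parens
-- ===== SOURCE A (Python) =====
-- def all_in_parens(exp):
--     if exp[0] == "(" and exp[-1] == ")":
--         parens_depth = 1
--         for j in range(1, len(exp) - 1):
--             if exp[j] == "(":
--                 parens_depth += 1
--             if exp[j] == ")":
--                 if parens_depth == 1:
--                     return False
--                 parens_depth -= 1
--         return True
-- ===== SOURCE B (Python) =====
-- def all_in_parens(exp):
--     if exp[0] == "(" and exp[-1] == ")":
--         # keep only the parentheses of the interior, then cancel matched "()"
--         # pairs to a normal form ")))...(((" ; the outer pair wraps everything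
--         # exactly when no unmatched ")" survives.
--         s = "".join(c for c in exp[1:-1] if c in "()")
--         while "()" in s:
--             s = s.replace("()", "")
--         return ")" not in s
-- ===== Notes on version B (the rewrite author's own statement) =====
-- stated objective: alternative
-- what changed: B has no depth counter: it filters the interior to its parentheses and repeatedly cancels matched "()" pairs until none remain, then answers whether any unmatched ")" survives in the normal form.
import Mathlib
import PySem

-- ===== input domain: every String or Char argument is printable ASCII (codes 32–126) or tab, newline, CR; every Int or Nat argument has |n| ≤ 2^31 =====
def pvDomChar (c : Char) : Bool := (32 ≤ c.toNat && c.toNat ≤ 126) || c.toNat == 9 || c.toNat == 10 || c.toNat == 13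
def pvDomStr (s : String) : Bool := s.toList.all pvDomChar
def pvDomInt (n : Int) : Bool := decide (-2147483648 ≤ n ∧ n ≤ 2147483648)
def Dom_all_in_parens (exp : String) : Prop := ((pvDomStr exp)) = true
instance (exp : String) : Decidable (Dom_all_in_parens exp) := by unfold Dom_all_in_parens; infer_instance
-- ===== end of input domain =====

-- B replaces A's depth-counter interior scan by a normalization algorithm: keep only the interior's
-- parentheses, repeatedly cancel matched "()" pairs, and answer whether an unmatched ')' survives.


-- ===== PORT A =====
-- A's for-loop over range(1, len(exp)-1): structural recursion over the interior characters,
-- carrying parens_depth; 'some false' is the early 'return False'.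
def aipLoopA (cs : List Char) (depth : Int) : Option Bool :=
  match cs with
  | [] => some true
  | c :: rest =>
    let depth := if c = '(' then depth + 1 else depth
    if c = ')' then
      if depth = 1 then some false
      else aipLoopA rest (depth - 1)
    else aipLoopA rest depth

def all_in_parens (exp : String) : Option Bool :=
  if PySem.Str.pyGet? exp 0 = some '(' ∧ PySem.Str.pyGet? exp (-1) = some ')' then
    aipLoopA ((exp.toList.drop 1).take (exp.toList.length - 2)) 1
  else none

-- ===== PORT B =====
-- '"()" in s'
def containsPair : List Char → Bool
  | [] => false
  | [_] => false
  | c :: d :: rest => (c = '(' && d = ')') || containsPair (d :: rest)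

-- 's.replace("()", "")': one left-to-right pass removing non-overlapping "()" occurrences
def removePairsOnce : List Char → List Char
  | [] => []
  | [c] => [c]
  | c :: d :: rest =>
    if c = '(' ∧ d = ')' then removePairsOnce rest else c :: removePairsOnce (d :: rest)

theorem removePairsOnce_length_le (cs : List Char) :
    (removePairsOnce cs).length ≤ cs.length := by
  induction cs using removePairsOnce.induct with
  | case1 => simp [removePairsOnce]
  | case2 => simp [removePairsOnce]
  | case3 c d rest h ih => simp [removePairsOnce, h]; omega
  | case4 c d rest h ih =>
    rw [removePairsOnce, if_neg h]
    simp only [List.length_cons] at ih ⊢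
    omega

theorem removePairsOnce_length_lt (cs : List Char) (h : containsPair cs = true) :
    (removePairsOnce cs).length < cs.length := by
  induction cs using removePairsOnce.induct with
  | case1 => simp [containsPair] at h
  | case2 => simp [containsPair] at h
  | case3 c d rest hp ih =>
    have := removePairsOnce_length_le rest
    simp [removePairsOnce, hp]; omega
  | case4 c d rest hp ih =>
    simp [containsPair] at h
    rcases h with h | h
    · exact absurd ⟨h.1, h.2⟩ hp
    · have := ih h
      rw [removePairsOnce, if_neg hp]
      simp only [List.length_cons] at this ⊢
      omega

-- the while-loop 'while "()" in s: s = s.replace("()", "")'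
def cancelAll (cs : List Char) : List Char :=
  if h : containsPair cs = true then cancelAll (removePairsOnce cs) else cs
termination_by cs.length
decreasing_by exact removePairsOnce_length_lt cs h

-- 'c in "()"'
def isParen (c : Char) : Bool := c = '(' || c = ')'

def all_in_parens_alt (exp : String) : Option Bool :=
  if PySem.Str.pyGet? exp 0 = some '(' ∧ PySem.Str.pyGet? exp (-1) = some ')' then
    let s := ((exp.toList.drop 1).take (exp.toList.length - 2)).filter isParen
    some (! (cancelAll s).contains ')')
  else none

-- ===== PRECONDITION & SPEC =====
-- Pre_ excludes exactly the empty string, on which Python A raises IndexError at exp[0].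
def Pre_all_in_parens (exp : String) : Prop := exp ≠ ""
instance (exp : String) : Decidable (Pre_all_in_parens exp) := by unfold Pre_all_in_parens; infer_instance
def pvWitness_all_in_parens : String := "(1+2)"

def Spec_all_in_parens (exp : String) (out : Option Bool) : Prop := out = all_in_parens_alt exp
instance (exp : String) (out : Option Bool) : Decidable (Spec_all_in_parens exp out) := by unfold Spec_all_in_parens; infer_instance

-- ===== CLAIM (what is proved, stated in full; the proofs are below) =====
def Claim_equal_all_in_parens : Prop := ∀ (exp : String), Dom_all_in_parens exp → Pre_all_in_parens exp → Spec_all_in_parens exp (all_in_parens exp)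

-- ===== LEMMAS AND PROOFS =====

-- A's loop ignores characters that are not parentheses
theorem aipLoopA_filter (cs : List Char) (d : Int) :
    aipLoopA cs d = aipLoopA (cs.filter isParen) d := by
  induction cs generalizing d with
  | nil => rfl
  | cons c rest ih =>
    by_cases ho : c = '('
    · subst ho; simp [aipLoopA, List.filter, isParen, ih]
    · by_cases hc : c = ')'
      · subst hc; simp [aipLoopA, List.filter, isParen]
        split <;> simp [ih]
      · simp [aipLoopA, List.filter, isParen, ho, hc, ih]

-- one cancellation pass does not change A's loop result (for depth ≥ 1)
theorem aipLoopA_removePairsOnce (cs : List Char) (d : Int) (hd : 1 ≤ d) :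
    aipLoopA (removePairsOnce cs) d = aipLoopA cs d := by
  induction cs using removePairsOnce.induct generalizing d with
  | case1 => rfl
  | case2 => rfl
  | case3 c d' rest hp ih =>
    obtain ⟨h1, h2⟩ := hp; subst h1; subst h2
    rw [removePairsOnce, if_pos ⟨rfl, rfl⟩, ih d hd]
    have h2 : ¬ (d + 1 = 1) := by omega
    simp [aipLoopA, h2]
  | case4 c d' rest hp ih =>
    rw [removePairsOnce, if_neg hp]
    by_cases ho : c = '('
    · subst ho
      simp only [aipLoopA]
      simp only [reduceIte, reduceCtorEq]
      simp only [show (('(' : Char) = '(') = True by simp, show (('(' : Char) = ')') = False by decide, if_true, if_false]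
      exact ih (d + 1) (by omega)
    · by_cases hc : c = ')'
      · subst hc
        simp only [aipLoopA, if_neg (by decide : ¬ ((')' : Char) = '(')), if_pos rfl]
        by_cases h1 : d = 1
        · simp [h1]
        · simp only [if_neg h1]
          exact ih (d - 1) (by omega)
      · simp only [aipLoopA, if_neg ho, if_neg hc]
        exact ih d hd

theorem aipLoopA_cancelAll (cs : List Char) (d : Int) (hd : 1 ≤ d) :
    aipLoopA (cancelAll cs) d = aipLoopA cs d := by
  induction cs using cancelAll.induct generalizing d with
  | case1 cs h ih =>
    rw [cancelAll, dif_pos h, ih d hd, aipLoopA_removePairsOnce cs d hd]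
  | case2 cs h => rw [cancelAll, dif_neg h]

-- the result of cancelAll contains no "()" pair
theorem containsPair_cancelAll (cs : List Char) : containsPair (cancelAll cs) = false := by
  induction cs using cancelAll.induct with
  | case1 cs h ih => rw [cancelAll, dif_pos h]; exact ih
  | case2 cs h => rw [cancelAll, dif_neg h]; simpa using h

-- cancellation only deletes characters
theorem removePairsOnce_sublist (cs : List Char) : (removePairsOnce cs).Sublist cs := by
  induction cs using removePairsOnce.induct with
  | case1 => simp [removePairsOnce]
  | case2 => simp [removePairsOnce]
  | case3 c d rest hp ih =>
    rw [removePairsOnce, if_pos hp]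
    exact ih.trans ((List.sublist_cons_self _ _).trans (List.sublist_cons_self _ _))
  | case4 c d rest hp ih =>
    rw [removePairsOnce, if_neg hp]
    exact ih.cons₂ c

theorem cancelAll_sublist (cs : List Char) : (cancelAll cs).Sublist cs := by
  induction cs using cancelAll.induct with
  | case1 cs h ih =>
    rw [cancelAll, dif_pos h]
    exact ih.trans (removePairsOnce_sublist cs)
  | case2 cs h => rw [cancelAll, dif_neg h]

-- a pair-free paren-only list starting with '(' is all '('
theorem noClose_of_open (cs : List Char) (hpo : ∀ c ∈ cs, c = '(' ∨ c = ')')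
    (hnp : containsPair ('(' :: cs) = false) : ∀ c ∈ cs, c = '(' := by
  induction cs with
  | nil => simp
  | cons c rest ih =>
    rcases hpo c (by simp) with h | h
    · subst h
      intro x hx
      simp only [List.mem_cons] at hx
      rcases hx with rfl | hx
      · rfl
      · exact ih (fun y hy => hpo y (by simp [hy])) (by simpa [containsPair] using hnp) x hx
    · subst h
      simp [containsPair] at hnp

-- A's loop accepts an all-'(' list at any depth
theorem aipLoopA_allOpen (cs : List Char) (h : ∀ c ∈ cs, c = '(') (d : Int) :
    aipLoopA cs d = some true := by
  induction cs generalizing d with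
  | nil => rfl
  | cons c rest ih =>
    have hc := h c (by simp)
    subst hc
    simp only [aipLoopA, if_pos rfl, if_neg (by decide : ¬ (('(' : Char) = ')'))]
    exact ih (fun x hx => h x (by simp [hx])) (d + 1)

-- on a pair-free paren-only list, A's loop at depth 1 answers "no ')' present"
theorem aipLoopA_normalForm (cs : List Char) (hpo : ∀ c ∈ cs, c = '(' ∨ c = ')')
    (hnp : containsPair cs = false) : aipLoopA cs 1 = some (! cs.contains ')') := by
  cases cs with
  | nil => rfl
  | cons c rest =>
    rcases hpo c (by simp) with h | h
    · subst h
      have hall := noClose_of_open rest (fun y hy => hpo y (by simp [hy])) hnp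
      have hmem : ')' ∉ rest := by
        intro hx
        have := hall _ hx
        simp at this
      have hnc : (('(' :: rest).contains ')') = false := by
        simp [List.contains_cons, List.contains_eq_mem, hmem]
      rw [hnc]
      simp only [aipLoopA, if_pos rfl, if_neg (by decide : ¬ (('(' : Char) = ')'))]
      simpa using aipLoopA_allOpen rest hall 2
    · subst h
      simp [aipLoopA, List.contains_cons]

-- ===== VERDICT (by name: the statement is the Claim_ definition above) =====
theorem all_in_parens_spec : Claim_equal_all_in_parens := by
  intro exp _ _
  unfold Spec_all_in_parens all_in_parens all_in_parens_alt
  by_cases hg : PySem.Str.pyGet? exp 0 = some '(' ∧ PySem.Str.pyGet? exp (-1) = some ')'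
  · rw [if_pos hg, if_pos hg]
    set I := (exp.toList.drop 1).take (exp.toList.length - 2) with hI
    have hpo : ∀ c ∈ I.filter isParen, c = '(' ∨ c = ')' := by
      intro c hc
      have := List.of_mem_filter hc
      simpa [isParen] using this
    have hposub : ∀ c ∈ cancelAll (I.filter isParen), c = '(' ∨ c = ')' := by
      intro c hc
      exact hpo c ((cancelAll_sublist _).mem hc)
    calc aipLoopA I 1
        = aipLoopA (I.filter isParen) 1 := aipLoopA_filter I 1
      _ = aipLoopA (cancelAll (I.filter isParen)) 1 := (aipLoopA_cancelAll _ 1 le_rfl).symm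
      _ = some (! (cancelAll (I.filter isParen)).contains ')') :=
          aipLoopA_normalForm _ hposub (containsPair_cancelAll _)
  · rw [if_neg hg, if_neg hg]
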